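-- pv_equiv track=rewrite | github.com/HaruyaNakatsuka/voronoi_routing | main.py | find_company_owning_pd_pair
-- ===== SOURCE A (Python) =====
-- def find_company_owning_pd_pair(routes_all, vehicle_num_list, pd_nodes):
--     """
--     PDノードのいずれか（または両方）を含む会社 index を返す。
--     routes_all: すべての車両ルートのリスト
--     vehicle_num_list: 各会社の車両数リスト
--     pd_nodes: {pickup_id, delivery_id}
--     """
--     pd_set = set(pd_nodes)
--     start = 0
--     for comp_idx, nveh in enumerate(vehicle_num_list):
--         end = start + nveh
--         company_routes = routes_all[start:end]
--         # 各ルートにPDノードのどれかが含まれているかを調べる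
--         if any(any(n in pd_set for n in r) for r in company_routes):
--             return comp_idx
--         start = end
--     return None
-- ===== SOURCE B (Python) =====
-- def find_company_owning_pd_pair(routes_all, vehicle_num_list, pd_nodes):
--     # Build an index node -> owning company (first write wins, so the minimum
--     # company index), then answer the query by a minimum over pd_nodes.
--     owner = {}
--     start = 0
--     for comp, nveh in enumerate(vehicle_num_list):
--         for r in routes_all[start:start + nveh]:
--             for n in r:
--                 if n not in owner:
--                     owner[n] = comp
--         start += nveh
--     best = None
--     for n in pd_nodes:
--         c = owner.get(n)
--         if c is not None and (best is None or c < best):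
--             best = c
--     return best
-- ===== Notes on version B (the rewrite author's own statement) =====
-- stated objective: alternative
-- what changed: B replaces A's in-order company scan with early exit by building a dict from node to the minimum owning company index in one pass over the per-company route slices and then taking the minimum over pd_nodes.
import Mathlib
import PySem

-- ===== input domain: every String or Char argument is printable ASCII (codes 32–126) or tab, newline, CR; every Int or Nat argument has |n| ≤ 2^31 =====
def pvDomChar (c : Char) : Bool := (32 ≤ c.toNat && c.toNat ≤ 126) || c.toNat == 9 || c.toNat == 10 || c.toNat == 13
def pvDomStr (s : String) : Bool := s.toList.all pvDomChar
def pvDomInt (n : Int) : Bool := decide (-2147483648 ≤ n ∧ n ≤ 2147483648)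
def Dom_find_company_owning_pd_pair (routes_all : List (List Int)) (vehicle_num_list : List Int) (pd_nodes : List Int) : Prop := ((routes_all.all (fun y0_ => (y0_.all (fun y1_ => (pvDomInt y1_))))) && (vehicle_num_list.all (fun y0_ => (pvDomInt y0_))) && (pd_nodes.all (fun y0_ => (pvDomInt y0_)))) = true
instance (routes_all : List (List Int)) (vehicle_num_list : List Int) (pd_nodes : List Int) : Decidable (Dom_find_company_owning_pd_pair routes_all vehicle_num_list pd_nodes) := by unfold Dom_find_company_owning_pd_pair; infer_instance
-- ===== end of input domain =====

-- B builds a node -> minimum-owning-company index in one pass over the per-company route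
-- slices and answers by a minimum over pd_nodes, instead of A's in-order company scan with
-- early exit (alternative decomposition, same cost).

-- ===== PORT A =====
def pvGoA (routes_all : List (List Int)) (pd_set : PySem.Set Int) : Int → Int → List Int → Option Int
  | _, _, [] => none
  | comp, start, nveh :: rest =>
    let e := start + nveh
    let company_routes := PySem.List.slice routes_all (some start) (some e)
    if company_routes.any (fun r => r.any (fun n => PySem.Set.contains pd_set n)) then some comp
    else pvGoA routes_all pd_set (comp + 1) e rest

def find_company_owning_pd_pair (routes_all : List (List Int)) (vehicle_num_list : List Int) (pd_nodes : List Int) : Option Int :=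
  pvGoA routes_all (PySem.Set.ofList pd_nodes) 0 0 vehicle_num_list

-- ===== PORT B =====
def pvBuildB (routes_all : List (List Int)) : Int → Int → List Int → PySem.Dict Int Int → PySem.Dict Int Int
  | _, _, [], d => d
  | comp, start, nveh :: rest, d =>
    let company_routes := PySem.List.slice routes_all (some start) (some (start + nveh))
    pvBuildB routes_all (comp + 1) (start + nveh) rest
      (company_routes.foldl (fun d r =>
        r.foldl (fun d n => if PySem.Dict.contains d n then d else PySem.Dict.insert d n comp) d) d)

def find_company_owning_pd_pair_alt (routes_all : List (List Int)) (vehicle_num_list : List Int) (pd_nodes : List Int) : Option Int :=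
  let owner := pvBuildB routes_all 0 0 vehicle_num_list PySem.Dict.empty
  pd_nodes.foldl (fun best n =>
    match PySem.Dict.get? owner n with
    | none => best
    | some c =>
      match best with
      | none => some c
      | some b => if c < b then some c else best) none

-- ===== PRECONDITION & SPEC =====
def Spec_find_company_owning_pd_pair (routes_all : List (List Int)) (vehicle_num_list : List Int) (pd_nodes : List Int) (out : Option Int) : Prop := out = find_company_owning_pd_pair_alt routes_all vehicle_num_list pd_nodes
instance (routes_all : List (List Int)) (vehicle_num_list : List Int) (pd_nodes : List Int) (out : Option Int) : Decidable (Spec_find_company_owning_pd_pair routes_all vehicle_num_list pd_nodes out) := by unfold Spec_find_company_owning_pd_pair; infer_instance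

-- ===== CLAIM (what is proved, stated in full; the proofs are below) =====
def Claim_equal_find_company_owning_pd_pair : Prop := ∀ (routes_all : List (List Int)) (vehicle_num_list : List Int) (pd_nodes : List Int), Dom_find_company_owning_pd_pair routes_all vehicle_num_list pd_nodes → Spec_find_company_owning_pd_pair routes_all vehicle_num_list pd_nodes (find_company_owning_pd_pair routes_all vehicle_num_list pd_nodes)

-- ===== LEMMAS AND PROOFS =====

def pvHitP (pd_set : PySem.Set Int) (p : List Int × Int) : Bool :=
  p.1.any (fun n => PySem.Set.contains pd_set n)

def pvOwnerStep (d : PySem.Dict Int Int) (p : List Int × Int) : PySem.Dict Int Int :=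
  p.1.foldl (fun d n => if PySem.Dict.contains d n then d else PySem.Dict.insert d n p.2) d

-- the (route, company) pairs both programs traverse, in traversal order
def pvChunks (routes_all : List (List Int)) : Int → Int → List Int → List (List Int × Int)
  | _, _, [] => []
  | comp, start, nveh :: rest =>
    (PySem.List.slice routes_all (some start) (some (start + nveh))).map (fun r => (r, comp))
      ++ pvChunks routes_all (comp + 1) (start + nveh) rest

theorem pv_find_map_const (pd_set : PySem.Set Int) (comp : Int) (ts : List (List Int)) :
    (((ts.map (fun r => (r, comp))).find? (pvHitP pd_set)).map Prod.snd)
      = if ts.any (fun r => r.any (fun n => PySem.Set.contains pd_set n)) then some comp else none := by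
  induction ts with
  | nil => simp
  | cons t ts ih =>
    by_cases h : t.any (fun n => PySem.Set.contains pd_set n)
    · simp only [List.map_cons, List.any_cons]
      rw [List.find?_cons_of_pos (by simpa [pvHitP] using h)]
      simp only [h, Bool.true_or, if_true, Option.map_some]
    · simp only [List.map_cons, List.any_cons]
      rw [List.find?_cons_of_neg (by simpa [pvHitP] using h), ih]
      simp only [Bool.eq_false_iff.mpr h, Bool.false_or]

theorem pvGoA_eq_find (pd_set : PySem.Set Int) (rs : List (List Int)) :
    ∀ (vlist : List Int) (comp start : Int),
      pvGoA rs pd_set comp start vlist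
        = ((pvChunks rs comp start vlist).find? (pvHitP pd_set)).map Prod.snd := by
  intro vlist
  induction vlist with
  | nil => intro comp start; simp [pvGoA, pvChunks]
  | cons nveh rest ih =>
    intro comp start
    simp only [pvGoA, pvChunks]
    rw [List.find?_append]
    have hmap := pv_find_map_const pd_set comp (PySem.List.slice rs (some start) (some (start + nveh)))
    by_cases hcond : (PySem.List.slice rs (some start) (some (start + nveh))).any
        (fun r => r.any fun n => pd_set.contains n) = true
    · rw [if_pos hcond]
      rw [if_pos hcond] at hmap
      cases hf : ((PySem.List.slice rs (some start) (some (start + nveh))).map (fun r => (r, comp))).find? (pvHitP pd_set) with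
      | none => rw [hf] at hmap; simp at hmap
      | some p =>
        rw [hf] at hmap
        simp only [Option.map_some, Option.some.injEq] at hmap
        simp [Option.some_or, hmap]
    · rw [if_neg hcond]
      rw [if_neg hcond, Option.map_eq_none_iff] at hmap
      rw [hmap, Option.none_or, ih]

theorem pvBuildB_eq_foldl (rs : List (List Int)) :
    ∀ (vlist : List Int) (comp start : Int) (d : PySem.Dict Int Int),
      pvBuildB rs comp start vlist d = (pvChunks rs comp start vlist).foldl pvOwnerStep d := by
  intro vlist
  induction vlist with
  | nil => intro comp start d; simp [pvBuildB, pvChunks]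
  | cons nveh rest ih =>
    intro comp start d
    simp only [pvBuildB, pvChunks]
    rw [List.foldl_append, List.foldl_map, ih]
    rfl

theorem pv_chunks_le (rs : List (List Int)) :
    ∀ (vlist : List Int) (comp start : Int) (p : List Int × Int),
      p ∈ pvChunks rs comp start vlist → comp ≤ p.2 := by
  intro vlist
  induction vlist with
  | nil => intro comp start p hp; simp [pvChunks] at hp
  | cons nveh rest ih =>
    intro comp start p hp
    simp only [pvChunks, List.mem_append, List.mem_map] at hp
    rcases hp with ⟨r, -, rfl⟩ | hp
    · exact le_refl _
    · exact le_trans (by omega) (ih (comp + 1) (start + nveh) p hp)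

theorem pv_chunks_pairwise (rs : List (List Int)) :
    ∀ (vlist : List Int) (comp start : Int),
      (pvChunks rs comp start vlist).Pairwise (fun a b => a.2 ≤ b.2) := by
  intro vlist
  induction vlist with
  | nil => intro comp start; simp [pvChunks]
  | cons nveh rest ih =>
    intro comp start
    simp only [pvChunks]
    rw [List.pairwise_append]
    refine ⟨?_, ih (comp + 1) (start + nveh), ?_⟩
    · rw [List.pairwise_map]
      exact List.Pairwise.imp (fun _ => le_refl comp) (List.pairwise_of_forall_mem_list (fun _ _ _ _ => trivial))
    · intro a ha b hb
      rw [List.mem_map] at ha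
      obtain ⟨r, -, rfl⟩ := ha
      exact le_trans (by omega) (pv_chunks_le rs rest (comp + 1) (start + nveh) b hb)

theorem pv_ownerRoute_get (c : Int) (m : Int) :
    ∀ (r : List Int) (d : PySem.Dict Int Int),
      PySem.Dict.get? (r.foldl (fun d n => if PySem.Dict.contains d n then d else PySem.Dict.insert d n c) d) m
        = ((PySem.Dict.get? d m).orElse (fun _ => if r.contains m then some c else none)) := by
  intro r
  induction r with
  | nil =>
    intro d
    cases h : PySem.Dict.get? d m <;> simp [Option.orElse, h]
  | cons n r ihr =>
    intro d
    simp only [List.foldl_cons]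
    rw [ihr]
    by_cases hc : PySem.Dict.contains d n
    · rw [if_pos hc]
      cases hg : PySem.Dict.get? d m with
      | some v => simp [Option.orElse]
      | none =>
        have hmn : m ≠ n := by
          intro he; subst he
          rw [PySem.Dict.get?_eq_none_iff_contains] at hg
          rw [hg] at hc; exact absurd hc (by simp)
        simp [Option.orElse, hmn]
    · rw [if_neg hc]
      by_cases hmn : m = n
      · subst hmn
        have hg : PySem.Dict.get? d m = none := by
          rw [PySem.Dict.get?_eq_none_iff_contains]
          simpa using hc
        simp [Option.orElse, hg, PySem.Dict.get?_insert_self]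
      · rw [PySem.Dict.get?_insert_of_ne (hne := hmn)]
        cases hg : PySem.Dict.get? d m with
        | some v => simp [Option.orElse]
        | none => simp [Option.orElse, hmn]

theorem pv_owner_get (m : Int) :
    ∀ (l : List (List Int × Int)) (d : PySem.Dict Int Int),
      PySem.Dict.get? (l.foldl pvOwnerStep d) m
        = ((PySem.Dict.get? d m).orElse (fun _ => (l.find? (fun p => p.1.contains m)).map Prod.snd)) := by
  intro l
  induction l with
  | nil =>
    intro d
    cases h : PySem.Dict.get? d m <;> simp [Option.orElse, h]
  | cons p l ihl =>
    intro d
    simp only [List.foldl_cons]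
    rw [ihl]
    rw [pvOwnerStep, pv_ownerRoute_get]
    by_cases hc : p.1.contains m
    · cases hg : PySem.Dict.get? d m with
      | some v => simp [Option.orElse]
      | none =>
        rw [List.find?_cons_of_pos (by simpa using hc)]
        have hm : m ∈ p.1 := by simpa using hc
        simp [Option.orElse, hm]
    · rw [List.find?_cons_of_neg (by simpa using hc)]
      cases hg : PySem.Dict.get? d m with
      | some v => simp [Option.orElse]
      | none =>
        have hm : m ∉ p.1 := by simpa using hc
        simp [Option.orElse, hm]

theorem pv_foldMin (val : Int → Option Int) (cstar : Int) :
    ∀ (l : List Int) (acc : Option Int),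
      (∀ n ∈ l, ∀ c, val n = some c → cstar ≤ c) →
      (∀ b, acc = some b → cstar ≤ b) →
      ((∃ n ∈ l, val n = some cstar) ∨ acc = some cstar) →
      l.foldl (fun best n =>
        match val n with
        | none => best
        | some c => match best with
          | none => some c
          | some b => if c < b then some c else best) acc = some cstar := by
  intro l
  induction l with
  | nil =>
    intro acc _ _ h3
    rcases h3 with ⟨n, hn, -⟩ | h
    · simp at hn
    · simpa using h
  | cons n l ih =>
    intro acc h1 h2 h3
    simp only [List.foldl_cons]
    have h1' : ∀ m ∈ l, ∀ c, val m = some c → cstar ≤ c :=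
      fun m hm => h1 m (List.mem_cons_of_mem _ hm)
    cases hv : val n with
    | none =>
      apply ih acc h1' h2
      rcases h3 with ⟨m, hm, hvm⟩ | ha
      · rcases List.mem_cons.mp hm with rfl | hm'
        · rw [hv] at hvm; cases hvm
        · exact Or.inl ⟨m, hm', hvm⟩
      · exact Or.inr ha
    | some c =>
      have hcs : cstar ≤ c := h1 n List.mem_cons_self c hv
      cases acc with
      | none =>
        apply ih (some c) h1' (fun b hb => by simp only [Option.some.injEq] at hb; omega)
        rcases h3 with ⟨m, hm, hvm⟩ | ha
        · rcases List.mem_cons.mp hm with rfl | hm'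
          · rw [hv] at hvm
            exact Or.inr hvm
          · exact Or.inl ⟨m, hm', hvm⟩
        · cases ha
      | some b0 =>
        have hb0 : cstar ≤ b0 := h2 b0 rfl
        have hshow : (List.foldl (fun best n =>
            match val n with
            | none => best
            | some c => match best with
              | none => some c
              | some b => if c < b then some c else best)
            (match some c with
            | none => some b0
            | some c => match some b0 with
              | none => some c
              | some b => if c < b then some c else some b0) l)
            = (List.foldl (fun best n =>
            match val n with
            | none => best
            | some c => match best with
              | none => some c
              | some b => if c < b then some c else best)
            (if c < b0 then some c else some b0) l) := rfl
        rw [hshow]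
        by_cases hlt : c < b0
        · rw [if_pos hlt]
          apply ih (some c) h1' (fun b hb => by simp only [Option.some.injEq] at hb; omega)
          rcases h3 with ⟨m, hm, hvm⟩ | ha
          · rcases List.mem_cons.mp hm with rfl | hm'
            · rw [hv] at hvm
              exact Or.inr hvm
            · exact Or.inl ⟨m, hm', hvm⟩
          · simp only [Option.some.injEq] at ha
            exact Or.inr (by simp only [Option.some.injEq]; omega)
        · rw [if_neg hlt]
          apply ih (some b0) h1' (fun b hb => by simp only [Option.some.injEq] at hb; omega)
          rcases h3 with ⟨m, hm, hvm⟩ | ha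
          · rcases List.mem_cons.mp hm with rfl | hm'
            · rw [hv] at hvm
              simp only [Option.some.injEq] at hvm
              exact Or.inr (by simp only [Option.some.injEq]; omega)
            · exact Or.inl ⟨m, hm', hvm⟩
          · exact Or.inr ha

theorem pv_foldMin_none (val : Int → Option Int) :
    ∀ (l : List Int) (acc : Option Int), (∀ n ∈ l, val n = none) →
      l.foldl (fun best n =>
        match val n with
        | none => best
        | some c => match best with
          | none => some c
          | some b => if c < b then some c else best) acc = acc := by
  intro l
  induction l with
  | nil => intro acc _; rfl
  | cons n l ih =>
    intro acc h
    simp only [List.foldl_cons, h n List.mem_cons_self]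
    exact ih acc (fun m hm => h m (List.mem_cons_of_mem _ hm))

theorem pvAlt_eq_find (routes_all : List (List Int)) (vlist : List Int) (pd_nodes : List Int) :
    find_company_owning_pd_pair_alt routes_all vlist pd_nodes
      = (((pvChunks routes_all 0 0 vlist).find? (pvHitP (PySem.Set.ofList pd_nodes))).map Prod.snd) := by
  unfold find_company_owning_pd_pair_alt
  rw [pvBuildB_eq_foldl]
  set pairs := pvChunks routes_all 0 0 vlist with hpairs
  set owner := pairs.foldl pvOwnerStep PySem.Dict.empty with howner
  have hval : ∀ n : Int, PySem.Dict.get? owner n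
      = ((pairs.find? (fun p => p.1.contains n)).map Prod.snd) := by
    intro n
    rw [howner, pv_owner_get]
    simp [Option.orElse]
  have hmem : ∀ n : Int, PySem.Set.contains (PySem.Set.ofList pd_nodes) n = true ↔ n ∈ pd_nodes := by
    intro n
    rw [PySem.Set.contains_iff]
    exact PySem.Set.mem_ofList pd_nodes n
  cases hfind : pairs.find? (pvHitP (PySem.Set.ofList pd_nodes)) with
  | none =>
    have hno : ∀ p ∈ pairs, ¬ pvHitP (PySem.Set.ofList pd_nodes) p := by
      exact fun p hp => by simpa using List.find?_eq_none.mp hfind p hp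
    simp only [Option.map_none]
    apply pv_foldMin_none
    intro n hn
    rw [hval n, Option.map_eq_none_iff, List.find?_eq_none]
    intro p hp
    simp only [Bool.not_eq_true, List.contains_eq_mem, decide_eq_false_iff_not]
    intro hmemp
    apply hno p hp
    rw [pvHitP, List.any_eq_true]
    exact ⟨n, hmemp, (hmem n).mpr hn⟩
  | some pstar =>
    have hsplit := List.find?_eq_some_iff_append.mp hfind
    obtain ⟨hpred, l1, l2, heq, hl1⟩ := hsplit
    have hpairwise : pairs.Pairwise (fun a b => a.2 ≤ b.2) :=
      pv_chunks_pairwise routes_all vlist 0 0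
    have htail : ∀ q ∈ pstar :: l2, pstar.2 ≤ q.2 := by
      rw [heq] at hpairwise
      have h2 := (List.pairwise_append.mp hpairwise).2.1
      rw [List.pairwise_cons] at h2
      intro q hq
      rcases List.mem_cons.mp hq with rfl | hq'
      · exact le_refl _
      · exact h2.1 q hq'
    have hfindn : ∀ n : Int, n ∈ pd_nodes → ∀ q, pairs.find? (fun p => p.1.contains n) = some q → q ∈ pstar :: l2 := by
      intro n hn q hq
      rw [heq, List.find?_append] at hq
      have hl1n : l1.find? (fun p => p.1.contains n) = none := by
        rw [List.find?_eq_none]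
        intro p hp
        simp only [Bool.not_eq_true, List.contains_eq_mem, decide_eq_false_iff_not]
        intro hmemp
        have hhit : pvHitP (PySem.Set.ofList pd_nodes) p = true := by
          rw [pvHitP, List.any_eq_true]; exact ⟨n, hmemp, (hmem n).mpr hn⟩
        exact absurd hhit (by simpa using hl1 p hp)
      rw [hl1n, Option.none_or] at hq
      exact List.mem_of_find?_eq_some hq
    have hF2 : ∀ n ∈ pd_nodes, ∀ c, PySem.Dict.get? owner n = some c → pstar.2 ≤ c := by
      intro n hn c hc
      rw [hval n] at hc
      cases hq : pairs.find? (fun p => p.1.contains n) with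
      | none => rw [hq] at hc; cases hc
      | some q =>
        rw [hq] at hc
        simp only [Option.map_some, Option.some.injEq] at hc
        subst hc
        exact htail q (hfindn n hn q hq)
    have hF1 : ∃ n ∈ pd_nodes, PySem.Dict.get? owner n = some pstar.2 := by
      rw [pvHitP, List.any_eq_true] at hpred
      obtain ⟨nstar, hnmem, hncont⟩ := hpred
      refine ⟨nstar, (hmem nstar).mp hncont, ?_⟩
      rw [hval nstar]
      have : pairs.find? (fun p => p.1.contains nstar) = some pstar := by
        rw [heq, List.find?_append]
        have hl1n : l1.find? (fun p => p.1.contains nstar) = none := by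
          rw [List.find?_eq_none]
          intro p hp
          simp only [Bool.not_eq_true, List.contains_eq_mem, decide_eq_false_iff_not]
          intro hmemp
          have hhit : pvHitP (PySem.Set.ofList pd_nodes) p = true := by
            rw [pvHitP, List.any_eq_true]; exact ⟨nstar, hmemp, hncont⟩
          exact absurd hhit (by simpa using hl1 p hp)
        rw [hl1n, Option.none_or]
        exact List.find?_cons_of_pos (by simpa using hnmem)
      rw [this]
      rfl
    simp only [Option.map_some]
    exact pv_foldMin (fun n => PySem.Dict.get? owner n) pstar.2 pd_nodes none hF2
      (fun b hb => by cases hb) (Or.inl hF1)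

-- ===== VERDICT (by name: the statement is the Claim_ definition above) =====
theorem find_company_owning_pd_pair_spec : Claim_equal_find_company_owning_pd_pair := by
  intro routes_all vlist pd_nodes _hdom
  unfold Spec_find_company_owning_pd_pair
  rw [find_company_owning_pd_pair, pvGoA_eq_find, pvAlt_eq_find]
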